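-- pv_equiv track=rewrite | github.com/BBR2394/AdventOfCode2K24 | day_09/main.py | get_last_int_end_str
-- ===== SOURCE A (Python) =====
-- def get_last_int_end_str(line):
--     i = len(line) - 1
--     index_last_int = len(line) - 1
--     while i > 0:
--         if line[i] != '.':
--             index_last_int = i
--             return index_last_int
--         i -= 1
-- ===== SOURCE B (Python) =====
-- def get_last_int_end_str(line):
--     last = None
--     for i, ch in enumerate(line):
--         if ch != '.':
--             last = i
--     if last is not None and last >= 1:
--         return last
-- ===== Notes on version B (the rewrite author's own statement) =====
-- stated objective: alternative
-- what changed: Replaces A's backward early-return index loop with a single forward pass that keeps the latest non-dot index in an accumulator and applies the >= 1 guard once at the end.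
import Mathlib
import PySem

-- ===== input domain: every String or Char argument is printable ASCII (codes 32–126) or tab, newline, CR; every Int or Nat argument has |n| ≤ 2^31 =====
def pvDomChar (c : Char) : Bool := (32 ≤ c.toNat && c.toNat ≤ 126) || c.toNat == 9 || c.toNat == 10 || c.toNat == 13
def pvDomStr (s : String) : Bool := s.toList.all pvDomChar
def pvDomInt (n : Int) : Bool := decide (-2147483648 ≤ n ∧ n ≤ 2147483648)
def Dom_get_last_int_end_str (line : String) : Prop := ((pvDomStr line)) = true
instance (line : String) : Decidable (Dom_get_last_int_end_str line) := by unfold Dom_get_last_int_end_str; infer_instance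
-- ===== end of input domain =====

-- B replaces A's backward early-return scan with a forward accumulator pass plus one final guard (alternative; same cost).
-- ===== PORT A =====
-- while i > 0: if line[i] != '.': return i; i -= 1   (i counts down; i = 0 is never examined)
def pvALoop (cs : List Char) : Nat → Option Int
  | i =>
    if h : i > 0 then
      if PySem.List.pyGet? cs (i : Int) ≠ some '.' then some (i : Int)
      else pvALoop cs (i - 1)
    else none

def get_last_int_end_str (line : String) : Option Int :=
  pvALoop line.toList (line.toList.length - 1)

-- ===== PORT B =====
-- last = None; for i, ch in enumerate(line): if ch != '.': last = i
def pvLastNonDot (cs : List Char) : Option Int :=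
  (PySem.List.enumerate cs).foldl (fun acc p => if p.2 ≠ '.' then some p.1 else acc) none

-- if last is not None and last >= 1: return last   (implicit None otherwise)
def get_last_int_end_str_alt (line : String) : Option Int :=
  match pvLastNonDot line.toList with
  | some last => if last ≥ 1 then some last else none
  | none => none

-- ===== PRECONDITION & SPEC =====
def Spec_get_last_int_end_str (line : String) (out : Option Int) : Prop := out = get_last_int_end_str_alt line
instance (line : String) (out : Option Int) : Decidable (Spec_get_last_int_end_str line out) := by unfold Spec_get_last_int_end_str; infer_instance

-- ===== CLAIM (what is proved, stated in full; the proofs are below) =====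
def Claim_equal_get_last_int_end_str : Prop := ∀ (line : String), Dom_get_last_int_end_str line → Spec_get_last_int_end_str line (get_last_int_end_str line)

-- ===== LEMMAS AND PROOFS =====

lemma pvALoop_zero (cs : List Char) : pvALoop cs 0 = none := by
  rw [pvALoop]; simp

lemma pvALoop_succ (cs : List Char) (k : Nat) :
    pvALoop cs (k + 1)
      = if PySem.List.pyGet? cs ((k + 1 : Nat) : Int) ≠ some '.'
        then some ((k + 1 : Nat) : Int) else pvALoop cs k := by
  rw [pvALoop]; simp

-- A's loop stays inside the original prefix: appending one char does not change it for indices < cs.length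
lemma pvALoop_append (cs : List Char) (c : Char) :
    ∀ i : Nat, i < cs.length → pvALoop (cs ++ [c]) i = pvALoop cs i := by
  intro i
  induction i with
  | zero => intro _; rw [pvALoop_zero, pvALoop_zero]
  | succ k ih =>
    intro hlt
    have hget : PySem.List.pyGet? (cs ++ [c]) ((k+1 : Nat) : Int)
        = PySem.List.pyGet? cs ((k+1 : Nat) : Int) := by
      rw [PySem.List.pyGet?_natCast, PySem.List.pyGet?_natCast]
      exact List.getElem?_append_left (by omega)
    rw [pvALoop_succ, pvALoop_succ, hget]
    by_cases hd : PySem.List.pyGet? cs ((k+1 : Nat) : Int) = some '.'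
    · simp only [hd, ne_eq, not_true_eq_false, if_false]
      exact ih (by omega)
    · push_cast at hd
      simp [hd]

-- B's forward fold: effect of one appended character
lemma pvLastNonDot_append (cs : List Char) (c : Char) :
    pvLastNonDot (cs ++ [c])
      = if c ≠ '.' then some ((cs.length : Nat) : Int) else pvLastNonDot cs := by
  unfold pvLastNonDot
  rw [PySem.List.enumerate_append, List.foldl_append]
  simp [PySem.List.enumerate]

-- traversal order does not matter: the backward early-return scan equals the forward-fold result under the guard
lemma pvMain (cs : List Char) :
    pvALoop cs (cs.length - 1)
      = (match pvLastNonDot cs with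
         | some last => if last ≥ 1 then some last else none
         | none => none) := by
  induction cs using List.reverseRecOn with
  | nil => rw [pvALoop]; simp [pvLastNonDot, PySem.List.enumerate]
  | append_singleton cs c ih =>
    by_cases hc : c = '.'
    · subst hc
      have hstrip : pvLastNonDot (cs ++ ['.']) = pvLastNonDot cs := by
        rw [pvLastNonDot_append]; simp
      rcases Nat.eq_zero_or_pos cs.length with h0 | hpos
      · have : cs = [] := List.eq_nil_of_length_eq_zero h0
        subst this
        rw [pvALoop]
        simp [pvLastNonDot, PySem.List.enumerate]
      · have hlen : (cs ++ ['.']).length - 1 = cs.length := by simp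
        rw [hlen]
        have hget : PySem.List.pyGet? (cs ++ ['.']) ((cs.length : Nat) : Int) = some '.' := by
          rw [PySem.List.pyGet?_natCast]; simp
        have h1 : pvALoop (cs ++ ['.']) cs.length = pvALoop (cs ++ ['.']) (cs.length - 1) := by
          rw [pvALoop, dif_pos hpos, hget]; simp
        rw [h1, pvALoop_append cs '.' (cs.length - 1) (by omega), ih, hstrip]
    · have hlast : pvLastNonDot (cs ++ [c]) = some ((cs.length : Nat) : Int) := by
        rw [pvLastNonDot_append]; simp [hc]
      have hlen : (cs ++ [c]).length - 1 = cs.length := by simp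
      rw [hlen, hlast]
      rcases Nat.eq_zero_or_pos cs.length with h0 | hpos
      · have : cs = [] := List.eq_nil_of_length_eq_zero h0
        subst this
        rw [pvALoop]
        simp
      · have hget : PySem.List.pyGet? (cs ++ [c]) ((cs.length : Nat) : Int) = some c := by
          rw [PySem.List.pyGet?_natCast]; simp
        rw [pvALoop, dif_pos hpos, if_pos (by rw [hget]; simp [hc])]
        have hge : ((cs.length : Nat) : Int) ≥ 1 := by push_cast; omega
        simp [hge]

-- ===== VERDICT (by name: the statement is the Claim_ definition above) =====
theorem get_last_int_end_str_spec : Claim_equal_get_last_int_end_str := by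
  intro line _
  unfold Spec_get_last_int_end_str get_last_int_end_str get_last_int_end_str_alt
  exact pvMain line.toList
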